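-- pv_equiv track=rewrite | github.com/seulbinHwang/Diffusion-Planner | diffusion_planner/data_process/map_process.py | _compute_lane_on_npc_routes
-- ===== SOURCE A (Python) =====
-- from typing import List, Dict, Tuple, Set, Optional
--
-- def _prune_route_by_connectivity(route_roadblock_ids: List[str],
--                                  roadblock_ids: Set[str]) -> List[str]:
--     """
--     Prune route by overlap with extracted roadblock elements within query radius to maintain connectivity in route
--     feature. Assumes route_roadblock_ids is ordered and connected to begin with.
--     :param route_roadblock_ids: List of roadblock ids representing route.
--     :param roadblock_ids: Set of ids of extracted roadblocks within query radius.
--     :return: List of pruned roadblock ids (connected and within query radius).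
--
--     - roadblock_ids = pruned_lane_roadblock_ids: List[str]
--       - lane_routes 중, route_roadblock_ids 인 친구들
--     """
--     pruned_route_roadblock_ids: List[str] = []
--     route_start = False  # wait for route to come into query radius before declaring broken connection
--
--     for roadblock_id in route_roadblock_ids:
--
--         if roadblock_id in roadblock_ids:
--             pruned_route_roadblock_ids.append(roadblock_id)
--             route_start = True
--
--         elif route_start:  # connection broken
--             break
--
--     return pruned_route_roadblock_ids
--
-- def _compute_lane_on_npc_routes(
--         near_token_to_route_roadblock_ids: Dict[str, Optional[List[str]]],
--         near_token_to_raw_route_roadblock_ids: Dict[str, Optional[List[str]]],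
--         lane_routes: List[str]) -> (List[List[bool]], List[List[bool]]):
--     """
--     lane_routes:List[str] : len = M (M = max_elements) (70게)
--         ego 거리 순으로 정렬되어 있음
--
--     각 토큰별 npc 경로와 raw 경로에 대해 현재 lane_routes 포함 여부를
--     True/False 리스트로 반환한다.
--     또한 pruned route ids에 대해 _prune_route_by_connectivity로 연결성 기준 후처리를 수행
--
--     Returns:
--         lane_on_npc_routes : List[List[bool]]
--         lane_on_raw_npc_routes : List[List[bool]]
--             - 전부 ego와의 거리 순서로 정렬되어 있음
--             - 각 요소 List[bool] 의 길이는  len = M (M = max_elements) (70게)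
--     """
--     lane_on_npc_routes: List[List[bool]] = []
--     lane_on_raw_npc_routes: List[List[bool]] = []
--
--     for token, npc_route_ids in near_token_to_route_roadblock_ids.items():
--         # len = M (M = max_elements) (70게)
--         npc_lane_on_route: List[bool] = []
--         npc_lane_on_raw_route: List[bool] = []
--         raw_ids = near_token_to_raw_route_roadblock_ids.get(token)
--
--         if npc_route_ids is None:
--             for _ in lane_routes:
--                 npc_lane_on_route.append(False)
--                 npc_lane_on_raw_route.append(False)
--         else:
--             # lane_routes에 포함되는 경로 id 선별
--             pruned_route_ids = [r for r in npc_route_ids if r in lane_routes]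
--             # 연결성 기준 후처리 (주석 해제하면 바로 사용 가능)
--             pruned_route_ids = _prune_route_by_connectivity(
--                 npc_route_ids, pruned_route_ids)
--             # raw 경로도 동일하게 필터링
--             pruned_raw_ids = [r for r in raw_ids if r in lane_routes
--                              ] if raw_ids else []
--
--             for route in lane_routes:
--                 npc_lane_on_route.append(route in pruned_route_ids)
--                 npc_lane_on_raw_route.append(route in pruned_raw_ids)
--
--         lane_on_npc_routes.append(npc_lane_on_route)
--         lane_on_raw_npc_routes.append(npc_lane_on_raw_route)
--
--     return lane_on_npc_routes, lane_on_raw_npc_routes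
-- ===== SOURCE B (Python) =====
-- def _compute_lane_on_npc_routes(near_token_to_route_roadblock_ids,
--                                 near_token_to_raw_route_roadblock_ids,
--                                 lane_routes):
--     # Invert lane_routes once: id -> all positions, then scatter True at those
--     # positions while scanning each NPC route (same connectivity break as A).
--     index = {}
--     for i, r in enumerate(lane_routes):
--         index.setdefault(r, []).append(i)
--     m = len(lane_routes)
--     lane_on_npc_routes = []
--     lane_on_raw_npc_routes = []
--     for token, npc_route_ids in near_token_to_route_roadblock_ids.items():
--         row = [False] * m
--         raw_row = [False] * m
--         if npc_route_ids is not None: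
--             started = False
--             for r in npc_route_ids:
--                 positions = index.get(r)
--                 if positions is not None:
--                     for i in positions:
--                         row[i] = True
--                     started = True
--                 elif started:
--                     break
--             raw_ids = near_token_to_raw_route_roadblock_ids.get(token)
--             if raw_ids is not None:
--                 for r in raw_ids:
--                     positions = index.get(r)
--                     if positions is not None:
--                         for i in positions:
--                             raw_row[i] = True
--         lane_on_npc_routes.append(row)
--         lane_on_raw_npc_routes.append(raw_row)
--     return lane_on_npc_routes, lane_on_raw_npc_routes
-- ===== Notes on version B (the rewrite author's own statement) =====
-- stated objective: alternative
-- what changed: B inverts lane_routes once into an id-to-positions index and scatters True into preallocated False rows while walking each token's route ids (keeping the same connectivity-break discipline), instead of A's building pruned id lists and then testing membership for every lane element per token.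
import Mathlib
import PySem

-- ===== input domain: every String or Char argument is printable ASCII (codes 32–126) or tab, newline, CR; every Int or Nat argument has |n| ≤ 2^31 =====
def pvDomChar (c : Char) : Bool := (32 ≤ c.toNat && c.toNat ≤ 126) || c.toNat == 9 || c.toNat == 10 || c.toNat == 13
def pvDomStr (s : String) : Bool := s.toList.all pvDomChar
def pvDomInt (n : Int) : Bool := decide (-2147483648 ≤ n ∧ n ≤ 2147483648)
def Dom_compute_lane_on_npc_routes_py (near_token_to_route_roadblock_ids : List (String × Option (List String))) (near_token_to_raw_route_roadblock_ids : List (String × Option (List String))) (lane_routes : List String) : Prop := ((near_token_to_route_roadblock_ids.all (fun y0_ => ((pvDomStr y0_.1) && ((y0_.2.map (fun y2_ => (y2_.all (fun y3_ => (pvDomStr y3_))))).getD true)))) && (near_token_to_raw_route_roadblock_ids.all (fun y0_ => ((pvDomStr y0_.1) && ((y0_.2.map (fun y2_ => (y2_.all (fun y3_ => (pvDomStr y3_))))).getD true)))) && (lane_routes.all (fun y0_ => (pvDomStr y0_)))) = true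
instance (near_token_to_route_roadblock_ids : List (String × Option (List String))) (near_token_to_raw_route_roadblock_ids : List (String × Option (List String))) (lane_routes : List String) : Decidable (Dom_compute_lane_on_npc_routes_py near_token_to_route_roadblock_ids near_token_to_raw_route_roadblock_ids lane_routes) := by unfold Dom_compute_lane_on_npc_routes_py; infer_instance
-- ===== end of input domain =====

-- B inverts lane_routes once into an id → positions index and scatters True at
-- those positions while scanning each route, instead of A's per-lane membership
-- scans over the pruned id lists (objective: alternative decomposition).

-- ===== PORT A =====
-- the 'for roadblock_id in route_roadblock_ids' loop of _prune_route_by_connectivity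
-- (accumulator = pruned_route_roadblock_ids, Bool = route_start, early 'break' = returning acc)
def pruneAux (ids : List String) : List String → Bool → List String → List String
  | [], _, acc => acc
  | r :: rest, started, acc =>
    if ids.contains r then pruneAux ids rest true (acc ++ [r])
    else if started then acc
    else pruneAux ids rest started acc

def prune_route_by_connectivity (route_roadblock_ids : List String)
    (roadblock_ids : List String) : List String :=
  pruneAux roadblock_ids route_roadblock_ids false []

-- one iteration of A's 'for token, npc_route_ids in …items()' loop: the pair
-- (npc_lane_on_route, npc_lane_on_raw_route) appended for this token
-- (the Python loop 'for route in lane_routes: append…' over two lists = two maps)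
def aRows (near_token_to_raw_route_roadblock_ids : List (String × Option (List String)))
    (lane_routes : List String) (p : String × Option (List String)) :
    List Bool × List Bool :=
  let raw_ids : Option (List String) :=
    ((PySem.Dict.mk near_token_to_raw_route_roadblock_ids).get? p.1).join
  match p.2 with
  | none => (lane_routes.map (fun _ => false), lane_routes.map (fun _ => false))
  | some npc_route_ids =>
    let pruned0 := npc_route_ids.filter (fun r => lane_routes.contains r)
    let pruned := prune_route_by_connectivity npc_route_ids pruned0
    let pruned_raw : List String :=
      match raw_ids with
      | some l => if l.isEmpty then [] else l.filter (fun r => lane_routes.contains r)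
      | none => []
    (lane_routes.map (fun route => pruned.contains route),
     lane_routes.map (fun route => pruned_raw.contains route))

def compute_lane_on_npc_routes_py (near_token_to_route_roadblock_ids : List (String × Option (List String))) (near_token_to_raw_route_roadblock_ids : List (String × Option (List String))) (lane_routes : List String) : List (List Bool) × List (List Bool) :=
  near_token_to_route_roadblock_ids.foldl
    (fun acc p =>
      (acc.1 ++ [(aRows near_token_to_raw_route_roadblock_ids lane_routes p).1],
       acc.2 ++ [(aRows near_token_to_raw_route_roadblock_ids lane_routes p).2]))
    ([], [])

-- ===== PORT B =====
-- 'for i, r in enumerate(lane_routes): index.setdefault(r, []).append(i)'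
def buildIndex (lane_routes : List String) : PySem.Dict String (List Int) :=
  (PySem.List.enumerate lane_routes).foldl
    (fun d p => d.modify p.2 [] (fun v => v ++ [p.1])) PySem.Dict.empty

-- B's scan of npc_route_ids: scatter True at the indexed positions, with the
-- same started/break discipline ('positions = index.get(r)' = get?)
-- (positions come from enumerate, hence are ≥ 0: '.toNat' is exact here)
def bScan (idx : PySem.Dict String (List Int)) :
    List String → Bool → List Bool → List Bool
  | [], _, row => row
  | r :: rest, started, row =>
    match idx.get? r with
    | some ps => bScan idx rest true (ps.foldl (fun rr i => rr.set i.toNat true) row)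
    | none => if started then row else bScan idx rest started row

-- B's 'for r in raw_ids: …scatter…' loop
def bRawScan (idx : PySem.Dict String (List Int)) (l : List String)
    (row : List Bool) : List Bool :=
  l.foldl (fun rr r =>
    match idx.get? r with
    | some ps => ps.foldl (fun rr i => rr.set i.toNat true) rr
    | none => rr) row

-- one iteration of B's token loop: (row, raw_row) for this token
def bRows (idx : PySem.Dict String (List Int))
    (near_token_to_raw_route_roadblock_ids : List (String × Option (List String)))
    (m : Nat) (p : String × Option (List String)) : List Bool × List Bool :=
  match p.2 with
  | none => (List.replicate m false, List.replicate m false)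
  | some npc_route_ids =>
    (bScan idx npc_route_ids false (List.replicate m false),
     match ((PySem.Dict.mk near_token_to_raw_route_roadblock_ids).get? p.1).join with
     | some raw_ids => bRawScan idx raw_ids (List.replicate m false)
     | none => List.replicate m false)

def compute_lane_on_npc_routes_py_alt (near_token_to_route_roadblock_ids : List (String × Option (List String))) (near_token_to_raw_route_roadblock_ids : List (String × Option (List String))) (lane_routes : List String) : List (List Bool) × List (List Bool) :=
  let index := buildIndex lane_routes
  let m := lane_routes.length
  near_token_to_route_roadblock_ids.foldl
    (fun acc p =>
      (acc.1 ++ [(bRows index near_token_to_raw_route_roadblock_ids m p).1],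
       acc.2 ++ [(bRows index near_token_to_raw_route_roadblock_ids m p).2]))
    ([], [])

-- ===== PRECONDITION & SPEC =====
def Spec_compute_lane_on_npc_routes_py (near_token_to_route_roadblock_ids : List (String × Option (List String))) (near_token_to_raw_route_roadblock_ids : List (String × Option (List String))) (lane_routes : List String) (out : List (List Bool) × List (List Bool)) : Prop := out = compute_lane_on_npc_routes_py_alt near_token_to_route_roadblock_ids near_token_to_raw_route_roadblock_ids lane_routes
instance (near_token_to_route_roadblock_ids : List (String × Option (List String))) (near_token_to_raw_route_roadblock_ids : List (String × Option (List String))) (lane_routes : List String) (out : List (List Bool) × List (List Bool)) : Decidable (Spec_compute_lane_on_npc_routes_py near_token_to_route_roadblock_ids near_token_to_raw_route_roadblock_ids lane_routes out) := by unfold Spec_compute_lane_on_npc_routes_py; infer_instance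

-- ===== CLAIM (what is proved, stated in full; the proofs are below) =====
def Claim_equal_compute_lane_on_npc_routes_py : Prop := ∀ (near_token_to_route_roadblock_ids : List (String × Option (List String))) (near_token_to_raw_route_roadblock_ids : List (String × Option (List String))) (lane_routes : List String), Dom_compute_lane_on_npc_routes_py near_token_to_route_roadblock_ids near_token_to_raw_route_roadblock_ids lane_routes → Spec_compute_lane_on_npc_routes_py near_token_to_route_roadblock_ids near_token_to_raw_route_roadblock_ids lane_routes (compute_lane_on_npc_routes_py near_token_to_route_roadblock_ids near_token_to_raw_route_roadblock_ids lane_routes)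

-- ===== LEMMAS AND PROOFS =====


theorem buildIndex_getD (L : List String) (r : String) :
    (buildIndex L).getD r [] =
      ((PySem.List.enumerate L).filter (fun p => p.2 == r)).map (·.1) := by
  unfold buildIndex
  have h2 : (PySem.List.enumerate L).foldl (fun d p => d.modify p.2 [] (fun v => v ++ [p.1])) PySem.Dict.empty
      = ((PySem.List.enumerate L).map (fun p => (p.2, p.1))).foldl (fun d p => d.modify p.1 [] (fun v => v ++ [p.2])) PySem.Dict.empty := by
    rw [List.foldl_map]
  rw [h2, PySem.Dict.getD_foldl_modify_append]
  simp only [PySem.Dict.getD_empty, List.nil_append, List.filter_map]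
  rw [List.map_map]
  rfl

theorem buildIndex_mem_keys (L : List String) (r : String) :
    r ∈ (buildIndex L).keys ↔ r ∈ L := by
  unfold buildIndex
  rw [PySem.Dict.keys_foldl_modify_key]
  simp [PySem.Set.mem_update, PySem.List.map_snd_enumerate]

theorem buildIndex_get?_eq_none (L : List String) (r : String) (h : r ∉ L) :
    (buildIndex L).get? r = none := by
  rw [PySem.Dict.get?_eq_none_iff_not_mem_keys]
  rw [buildIndex_mem_keys]
  exact h

theorem buildIndex_get?_eq_some (L : List String) (r : String) (h : r ∈ L) :
    (buildIndex L).get? r =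
      some (((PySem.List.enumerate L).filter (fun p => p.2 == r)).map (·.1)) := by
  have hk : r ∈ (buildIndex L).keys := (buildIndex_mem_keys L r).mpr h
  have hne : (buildIndex L).get? r ≠ none := by
    intro hnone
    exact ((PySem.Dict.get?_eq_none_iff_not_mem_keys _ _).mp hnone) hk
  obtain ⟨v, hv⟩ := Option.ne_none_iff_exists'.mp hne
  have hgd := buildIndex_getD L r
  rw [PySem.Dict.getD_eq_get?_getD, hv] at hgd
  simp only [Option.getD_some] at hgd
  rw [hv, hgd]

theorem length_fold_set (ps : List Int) (row : List Bool) :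
    (ps.foldl (fun rr i => rr.set i.toNat true) row).length = row.length := by
  induction ps generalizing row with
  | nil => rfl
  | cons i ps ih => simp [List.foldl_cons, ih]

theorem fold_set_getD (ps : List Int) (row : List Bool)
    (hps : ∀ i ∈ ps, i.toNat < row.length) (j : Nat) :
    (ps.foldl (fun rr i => rr.set i.toNat true) row).getD j false
      = (row.getD j false || ps.any (fun i => i.toNat == j)) := by
  induction ps generalizing row with
  | nil => simp
  | cons i ps ih =>
    rw [List.foldl_cons, ih _ (by intro x hx; rw [List.length_set]; exact hps x (List.mem_cons_of_mem _ hx))]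
    by_cases hij : i.toNat = j
    · subst hij
      have hlt : i.toNat < row.length := hps i (List.mem_cons_self ..)
      simp [List.getD_eq_getElem?_getD, hlt]
    · have hf : (i.toNat == j) = false := by simp [hij]
      simp [List.getD_eq_getElem?_getD, hij, hf]

theorem any_positions (L : List String) (r : String) (j : Nat) (hj : j < L.length) :
    (((PySem.List.enumerate L).filter (fun p => p.2 == r)).map (·.1)).any (fun i => i.toNat == j)
      = (L[j] == r) := by
  rw [Bool.eq_iff_iff]
  simp only [List.any_eq_true, List.mem_map, List.mem_filter, PySem.List.mem_enumerate_iff,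
    beq_iff_eq]
  constructor
  · rintro ⟨i, ⟨p, ⟨⟨k, hk, rfl⟩, hpr⟩, rfl⟩, hij⟩
    have hkj : k = j := by
      have : ((0 : Int) + (k : Int)).toNat = j := by exact_mod_cast hij
      omega
    subst hkj
    exact hpr
  · intro h
    refine ⟨(j : Int), ⟨(0 + (j : Int), L[j]), ⟨⟨j, hj, rfl⟩, by simpa using h⟩, by simp⟩, by simp⟩

theorem positions_lt (L : List String) (r : String) :
    ∀ i ∈ ((PySem.List.enumerate L).filter (fun p => p.2 == r)).map (·.1), i.toNat < L.length := by
  intro i hi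
  simp only [List.mem_map, List.mem_filter, PySem.List.mem_enumerate_iff] at hi
  obtain ⟨p, ⟨⟨k, hk, rfl⟩, _⟩, rfl⟩ := hi
  simpa using hk

theorem scatter_map (L : List String) (f : String → Bool) (r : String) :
    (((PySem.List.enumerate L).filter (fun p => p.2 == r)).map (·.1)).foldl
        (fun rr i => rr.set i.toNat true) (L.map f)
      = L.map (fun x => f x || (x == r)) := by
  apply List.ext_getElem
  · simp [length_fold_set]
  · intro j h1 h2
    rw [← List.getD_eq_getElem _ false h1, ← List.getD_eq_getElem _ false h2]
    have hj : j < L.length := by simpa using h2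
    rw [fold_set_getD _ _ (by simpa using positions_lt L r) j]
    rw [any_positions L r j hj]
    simp [List.getD_eq_getElem?_getD, hj]

theorem pruneAux_contains_acc (ids : List String) :
    ∀ (rest : List String) (started : Bool) (acc : List String) (x : String),
      (pruneAux ids rest started acc).contains x
        = (acc.contains x || (pruneAux ids rest started []).contains x) := by
  intro rest
  induction rest with
  | nil => intro started acc x; simp [pruneAux]
  | cons r rest ih =>
    intro started acc x
    by_cases hc : ids.contains r = true
    · simp only [pruneAux, hc, if_true]
      rw [ih true (acc ++ [r]) x, ih true ([] ++ [r]) x]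
      simp [Bool.or_assoc]
    · rw [Bool.not_eq_true] at hc
      cases hs : started
      · simp only [pruneAux, hc, Bool.false_eq_true, if_false]
        exact ih false acc x
      · have hne : r ∉ ids := by simpa using hc
        simp [pruneAux, hne]

theorem beq_decide (x r : String) : (x == r) = decide (x = r) := by
  by_cases h : x = r <;> simp [h]

theorem bScan_eq (L npcIds : List String) :
    ∀ (rest : List String), (∀ x ∈ rest, x ∈ npcIds) → ∀ (started : Bool) (f : String → Bool),
      bScan (buildIndex L) rest started (L.map f)
        = L.map (fun x => f x ||
            (pruneAux (npcIds.filter (fun r => L.contains r)) rest started []).contains x) := by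
  intro rest
  induction rest with
  | nil => intro _ started f; simp [bScan, pruneAux]
  | cons r rest ih =>
    intro hmem started f
    have hr : r ∈ npcIds := hmem r (List.mem_cons_self ..)
    by_cases hc : r ∈ L
    · have hfc : (npcIds.filter (fun r => L.contains r)).contains r = true := by
        simp [List.mem_filter, hr, hc]
      have hstep : bScan (buildIndex L) (r :: rest) started (L.map f)
            = bScan (buildIndex L) rest true
                ((((PySem.List.enumerate L).filter (fun p => p.2 == r)).map (·.1)).foldl
                  (fun rr i => rr.set i.toNat true) (L.map f)) := by
        simp [bScan, buildIndex_get?_eq_some L r hc]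
      rw [hstep, scatter_map]
      rw [ih (fun x hx => hmem x (List.mem_cons_of_mem _ hx)) true (fun x => f x || (x == r))]
      simp only [pruneAux, hfc, if_true]
      apply List.map_congr_left
      intro x _
      rw [pruneAux_contains_acc _ rest true ([] ++ [r]) x]
      simp [Bool.or_assoc, beq_decide]
    · have hfc : (npcIds.filter (fun r => L.contains r)).contains r = false := by
        simp [List.mem_filter]
        intro _; simpa using hc
      have hstep : bScan (buildIndex L) (r :: rest) started (L.map f)
            = if started then (L.map f) else bScan (buildIndex L) rest started (L.map f) := by
        simp [bScan, buildIndex_get?_eq_none L r hc]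
      rw [hstep]
      cases hs : started
      · simp only [Bool.false_eq_true, if_false]
        rw [ih (fun x hx => hmem x (List.mem_cons_of_mem _ hx)) false f]
        simp only [pruneAux, hfc, Bool.false_eq_true, if_false]
      · simp only [if_true]
        have hth : pruneAux (npcIds.filter (fun r => L.contains r)) (r :: rest) true [] = [] := by
          simp only [pruneAux, hfc, Bool.false_eq_true, if_false, if_true]
        rw [hth]
        simp

theorem bRawScan_eq (L : List String) :
    ∀ (l : List String) (f : String → Bool),
      bRawScan (buildIndex L) l (L.map f)
        = L.map (fun x => f x || (l.filter (fun r => L.contains r)).contains x) := by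
  intro l
  induction l with
  | nil => intro f; simp [bRawScan]
  | cons r l ih =>
    intro f
    by_cases hc : r ∈ L
    · have hstep : bRawScan (buildIndex L) (r :: l) (L.map f)
            = bRawScan (buildIndex L) l
                ((((PySem.List.enumerate L).filter (fun p => p.2 == r)).map (·.1)).foldl
                  (fun rr i => rr.set i.toNat true) (L.map f)) := by
        simp [bRawScan, buildIndex_get?_eq_some L r hc]
      rw [hstep, scatter_map, ih]
      have hLc : L.contains r = true := by simpa using hc
      simp only [List.filter_cons, hLc, if_true]
      apply List.map_congr_left
      intro x _
      simp [Bool.or_assoc, beq_decide]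
    · have hstep : bRawScan (buildIndex L) (r :: l) (L.map f)
            = bRawScan (buildIndex L) l (L.map f) := by
        simp [bRawScan, buildIndex_get?_eq_none L r hc]
      have hLc : L.contains r = false := by simpa using hc
      rw [hstep, ih]
      simp only [List.filter_cons, hLc, Bool.false_eq_true, if_false]

theorem rows_eq (d2 : List (String × Option (List String))) (L : List String)
    (p : String × Option (List String)) :
    aRows d2 L p = bRows (buildIndex L) d2 L.length p := by
  simp only [aRows, bRows]
  cases hp : p.2 with
  | none => simp [List.map_const']
  | some npc =>
    simp only [Prod.mk.injEq]
    have hrep : (List.replicate L.length false) = L.map (fun _ => false) := by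
      simp [List.map_const']
    constructor
    · rw [hrep, bScan_eq L npc npc (fun x hx => hx) false (fun _ => false)]
      unfold prune_route_by_connectivity
      apply List.map_congr_left
      intro x _
      simp
    · cases hraw : ((PySem.Dict.mk d2).get? p.1).join with
      | none => simp [List.map_const']
      | some lraw =>
        by_cases hE : lraw.isEmpty
        · have hnil : lraw = [] := List.isEmpty_iff.mp hE
          subst hnil
          simp [List.map_const', bRawScan]
        · have hEf : lraw.isEmpty = false := by simpa using hE
          rw [hrep]
          simp only [bRawScan_eq L lraw (fun _ => false), hEf, Bool.false_eq_true, if_false]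
          apply List.map_congr_left
          intro x _
          simp

theorem foldl_pair_append {α β : Type} (F : α → List β × List β) :
    ∀ (l : List α) (a b : List (List β)),
      l.foldl (fun acc x => (acc.1 ++ [(F x).1], acc.2 ++ [(F x).2])) (a, b)
        = (a ++ l.map (fun x => (F x).1), b ++ l.map (fun x => (F x).2)) := by
  intro l
  induction l with
  | nil => intro a b; simp
  | cons x xs ih => intro a b; simp [List.foldl_cons, ih]

-- ===== VERDICT (by name: the statement is the Claim_ definition above) =====
theorem compute_lane_on_npc_routes_py_spec : Claim_equal_compute_lane_on_npc_routes_py := by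
  intro d1 d2 L _
  unfold Spec_compute_lane_on_npc_routes_py
  unfold compute_lane_on_npc_routes_py compute_lane_on_npc_routes_py_alt
  rw [foldl_pair_append (F := aRows d2 L),
      foldl_pair_append (F := bRows (buildIndex L) d2 L.length)]
  simp only [List.nil_append, Prod.mk.injEq]
  constructor <;> · apply List.map_congr_left; intro p _; rw [rows_eq]
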